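-- pv_equiv track=rewrite | github.com/curtisboortz/nickel-and-dime | app/utils/buckets.py | rollup_breakdown
-- ===== SOURCE A (Python) =====
-- STANDARD_BUCKETS = [
--     "Alternatives", "Art", "Cash", "Crypto", "Equities", "Fixed Income",
--     "Gold", "International", "Managed Blend", "Real Assets", "Real Estate",
--     "Retirement Blend", "Silver",
-- ]
--
-- BUCKET_PARENTS = {
--     "Managed Blend": "Equities",
--     "Retirement Blend": "Equities",
--     "International": "Equities",
--     "Real Estate": "Real Assets",
--     "Art": "Real Assets",
--     "Gold": "Real Assets",
--     "Silver": "Real Assets",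
--     "Crypto": "Alternatives",
-- }
--
-- _BUCKET_ALIASES = {
--     "realassets": "Real Assets",
--     "real assets": "Real Assets",
--     "fixedincome": "Fixed Income",
--     "fixed income": "Fixed Income",
--     "managedblend": "Managed Blend",
--     "managed blend": "Managed Blend",
--     "retirementblend": "Retirement Blend",
--     "retirement blend": "Retirement Blend",
--     "realestate": "Real Estate",
--     "real estate": "Real Estate",
--     "alternatives": "Alternatives",
--     "commodities": "Real Assets",
-- }
--
-- def normalize_bucket(name):
--     """Normalize a bucket name to its canonical form."""
--     if not name:
--         return name
--     key = name.lower().strip()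
--     if key in _BUCKET_ALIASES:
--         return _BUCKET_ALIASES[key]
--     for sb in STANDARD_BUCKETS:
--         if key == sb.lower():
--             return sb
--     return name
--
-- def rollup_breakdown(breakdown, overrides=None):
--     """Roll sub-categories into parent categories.
--
--     *overrides* is an optional dict of ``{child: parent_or_None}`` that takes
--     precedence over the default ``BUCKET_PARENTS``.  A value of ``None``
--     means "standalone" (remove the default parent mapping).
--
--     Returns (rolled_up_dict, children_dict) where children_dict maps
--     parent -> {child: value, ...} for categories that were merged.
--     """
--     effective = dict(BUCKET_PARENTS)
--     if overrides:
--         for child, parent in overrides.items():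
--             normed_child = normalize_bucket(child)
--             if parent is None:
--                 effective.pop(normed_child, None)
--             else:
--                 effective[normed_child] = parent
--
--     rolled = {}
--     children = {}
--     for bucket, value in breakdown.items():
--         normed = normalize_bucket(bucket)
--         parent = effective.get(normed)
--         if parent:
--             rolled[parent] = rolled.get(parent, 0) + value
--             children.setdefault(parent, {})[normed] = \
--                 children.get(parent, {}).get(normed, 0) + value
--         else:
--             rolled[normed] = rolled.get(normed, 0) + value
--     return rolled, children
-- ===== SOURCE B (Python) =====
-- STANDARD_BUCKETS = [
--     "Alternatives", "Art", "Cash", "Crypto", "Equities", "Fixed Income",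
--     "Gold", "International", "Managed Blend", "Real Assets", "Real Estate",
--     "Retirement Blend", "Silver",
-- ]
--
-- BUCKET_PARENTS = {
--     "Managed Blend": "Equities",
--     "Retirement Blend": "Equities",
--     "International": "Equities",
--     "Real Estate": "Real Assets",
--     "Art": "Real Assets",
--     "Gold": "Real Assets",
--     "Silver": "Real Assets",
--     "Crypto": "Alternatives",
-- }
--
-- _BUCKET_ALIASES = {
--     "realassets": "Real Assets",
--     "real assets": "Real Assets",
--     "fixedincome": "Fixed Income",
--     "fixed income": "Fixed Income",
--     "managedblend": "Managed Blend",
--     "managed blend": "Managed Blend",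
--     "retirementblend": "Retirement Blend",
--     "retirement blend": "Retirement Blend",
--     "realestate": "Real Estate",
--     "real estate": "Real Estate",
--     "alternatives": "Alternatives",
--     "commodities": "Real Assets",
-- }
--
-- def normalize_bucket(name):
--     if not name:
--         return name
--     key = name.lower().strip()
--     if key in _BUCKET_ALIASES:
--         return _BUCKET_ALIASES[key]
--     for sb in STANDARD_BUCKETS:
--         if key == sb.lower():
--             return sb
--     return name
--
-- def rollup_breakdown(breakdown, overrides=None):
--     """Group-by re-implementation: normalize and tag every entry once, then
--     materialize the value groups per roll-up key (setdefault/append) and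
--     aggregate each group with sum(), instead of A's interleaved incremental
--     accumulation into both result dicts."""
--     effective = dict(BUCKET_PARENTS)
--     if overrides:
--         for child, parent in overrides.items():
--             normed_child = normalize_bucket(child)
--             if parent is None:
--                 effective.pop(normed_child, None)
--             else:
--                 effective[normed_child] = parent
--
--     entries = [(normalize_bucket(b), v) for b, v in breakdown.items()]
--     tagged = [(effective.get(n) or n, n, v) for n, v in entries]
--     merged = [(p, n, v) for p, n, v in tagged if effective.get(n)]
--
--     groups = {}
--     for t, _, v in tagged:
--         groups.setdefault(t, []).append(v)
--     rolled = {t: sum(vs) for t, vs in groups.items()}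
--
--     def _sub(nvs):
--         ngroups = {}
--         for n, v in nvs:
--             ngroups.setdefault(n, []).append(v)
--         return {n: sum(vs) for n, vs in ngroups.items()}
--
--     pgroups = {}
--     for p, n, v in merged:
--         pgroups.setdefault(p, []).append((n, v))
--     children = {p: _sub(nvs) for p, nvs in pgroups.items()}
--     return rolled, children
-- ===== Notes on version B (the rewrite author's own statement) =====
-- stated objective: alternative
-- what changed: A accumulates both result dicts incrementally in one interleaved loop; B normalizes and tags every entry once, then does a classic group-by: it materializes per-key value lists (setdefault/append) for the roll-up targets and, per parent, for the merged children, and aggregates each group with sum().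
import Mathlib
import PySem

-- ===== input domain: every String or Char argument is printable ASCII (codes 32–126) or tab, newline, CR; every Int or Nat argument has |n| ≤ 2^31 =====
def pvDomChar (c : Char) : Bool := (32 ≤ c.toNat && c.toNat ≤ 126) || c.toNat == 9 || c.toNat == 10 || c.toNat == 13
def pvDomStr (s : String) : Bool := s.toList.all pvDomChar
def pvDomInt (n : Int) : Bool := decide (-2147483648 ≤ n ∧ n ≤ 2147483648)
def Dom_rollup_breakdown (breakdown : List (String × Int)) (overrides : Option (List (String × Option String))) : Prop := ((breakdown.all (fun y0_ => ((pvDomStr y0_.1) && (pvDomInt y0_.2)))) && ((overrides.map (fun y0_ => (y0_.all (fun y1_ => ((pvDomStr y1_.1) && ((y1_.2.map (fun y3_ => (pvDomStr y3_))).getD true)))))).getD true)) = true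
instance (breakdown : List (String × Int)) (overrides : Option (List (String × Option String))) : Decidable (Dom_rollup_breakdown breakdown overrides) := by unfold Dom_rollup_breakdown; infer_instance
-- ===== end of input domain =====

-- B replaces A's single interleaved accumulation loop by a normalize-and-tag pass followed by a
-- group-by (materialize per-key value lists, then sum each group); same return value, no speed claim.

-- ===== PORT A =====
-- module constants and helper normalize_bucket, shared verbatim by both Pythons
def pvStandardBuckets : List String :=
  ["Alternatives", "Art", "Cash", "Crypto", "Equities", "Fixed Income",
   "Gold", "International", "Managed Blend", "Real Assets", "Real Estate",
   "Retirement Blend", "Silver"]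

def pvBucketParents : PySem.Dict String String := PySem.Dict.ofList
  [("Managed Blend", "Equities"), ("Retirement Blend", "Equities"), ("International", "Equities"),
   ("Real Estate", "Real Assets"), ("Art", "Real Assets"), ("Gold", "Real Assets"),
   ("Silver", "Real Assets"), ("Crypto", "Alternatives")]

def pvBucketAliases : PySem.Dict String String := PySem.Dict.ofList
  [("realassets", "Real Assets"), ("real assets", "Real Assets"), ("fixedincome", "Fixed Income"),
   ("fixed income", "Fixed Income"), ("managedblend", "Managed Blend"), ("managed blend", "Managed Blend"),
   ("retirementblend", "Retirement Blend"), ("retirement blend", "Retirement Blend"),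
   ("realestate", "Real Estate"), ("real estate", "Real Estate"),
   ("alternatives", "Alternatives"), ("commodities", "Real Assets")]

def normalize_bucket (name : String) : String :=
  if name = "" then name                                  -- 'if not name' (str falsy = empty)
  else
    let key := PySem.Str.strip (PySem.Str.lower name)
    match pvBucketAliases.get? key with
    | some v => v
    | none =>
      match pvStandardBuckets.find? (fun sb => key == PySem.Str.lower sb) with  -- first match = early return
      | some sb => sb
      | none => name

-- 'effective = dict(BUCKET_PARENTS); if overrides: for child, parent in overrides.items(): …'
-- (looping over an empty overrides dict is a no-op, so the truthiness test needs no extra branch)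
def pvEffective (overrides : Option (List (String × Option String))) : PySem.Dict String String :=
  match overrides with
  | none => pvBucketParents
  | some ovs => ovs.foldl (fun eff cp =>
      let normed_child := normalize_bucket cp.1
      match cp.2 with
      | none => eff.erase normed_child
      | some parent => eff.insert normed_child parent) pvBucketParents

def rollup_breakdown (breakdown : List (String × Int)) (overrides : Option (List (String × Option String))) : (List (String × Int)) × (List (String × List (String × Int))) :=
  let effective := pvEffective overrides
  let out := breakdown.foldl (fun rc bv =>
    let normed := normalize_bucket bv.1
    match effective.get? normed with
    | some parent =>
      if parent = "" then                                  -- 'if parent:' (falsy = empty string)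
        (rc.1.insert normed (rc.1.getD normed 0 + bv.2), rc.2)
      else
        (rc.1.insert parent (rc.1.getD parent 0 + bv.2),
         -- children.setdefault(parent, {})[normed] = children.get(parent, {}).get(normed, 0) + value
         rc.2.insert parent ((rc.2.getD parent PySem.Dict.empty).insert normed
           ((rc.2.getD parent PySem.Dict.empty).getD normed 0 + bv.2)))
    | none =>
        (rc.1.insert normed (rc.1.getD normed 0 + bv.2), rc.2))
    (PySem.Dict.empty, PySem.Dict.empty)
  (out.1.items, out.2.items.map (fun pd => (pd.1, pd.2.items)))

-- ===== PORT B =====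
-- helper _sub: group the (normed, value) pairs of one parent and sum each group
def pvSub (nvs : List (String × Int)) : List (String × Int) :=
  let ngroups := nvs.foldl (fun g nv => g.modify nv.1 [] (· ++ [nv.2])) PySem.Dict.empty
  ngroups.items.map (fun kv => (kv.1, kv.2.sum))

def rollup_breakdown_alt (breakdown : List (String × Int)) (overrides : Option (List (String × Option String))) : (List (String × Int)) × (List (String × List (String × Int))) :=
  let effective := pvEffective overrides
  let entries := breakdown.map (fun bv => (normalize_bucket bv.1, bv.2))
  -- tagged = [(effective.get(n) or n, n, v) for n, v in entries]
  let tagged : List (String × String × Int) := entries.map (fun nv =>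
    (match effective.get? nv.1 with
     | some p => if p = "" then nv.1 else p
     | none => nv.1, nv.1, nv.2))
  -- merged = [(p, n, v) for p, n, v in tagged if effective.get(n)]
  let merged := tagged.filter (fun x =>
    match effective.get? x.2.1 with
    | some p => !(p == "")
    | none => false)
  -- groups: per-target value lists via setdefault/append, then rolled sums each group
  let groups := tagged.foldl (fun g x => g.modify x.1 [] (· ++ [x.2.2])) PySem.Dict.empty
  let rolled := groups.items.map (fun kv => (kv.1, kv.2.sum))
  -- pgroups: per-parent (normed, value) lists, then children sub-aggregates each group
  let pgroups := merged.foldl (fun g x => g.modify x.1 [] (· ++ [(x.2.1, x.2.2)])) PySem.Dict.empty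
  let children := pgroups.items.map (fun kv => (kv.1, pvSub kv.2))
  (rolled, children)

-- ===== PRECONDITION & SPEC =====
def Spec_rollup_breakdown (breakdown : List (String × Int)) (overrides : Option (List (String × Option String))) (out : (List (String × Int)) × (List (String × List (String × Int)))) : Prop := out = rollup_breakdown_alt breakdown overrides
instance (breakdown : List (String × Int)) (overrides : Option (List (String × Option String))) (out : (List (String × Int)) × (List (String × List (String × Int)))) : Decidable (Spec_rollup_breakdown breakdown overrides out) := by unfold Spec_rollup_breakdown; infer_instance

-- ===== CLAIM (what is proved, stated in full; the proofs are below) =====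
def Claim_equal_rollup_breakdown : Prop := ∀ (breakdown : List (String × Int)) (overrides : Option (List (String × Option String))), Dom_rollup_breakdown breakdown overrides → Spec_rollup_breakdown breakdown overrides (rollup_breakdown breakdown overrides)

-- ===== LEMMAS AND PROOFS =====

-- the uniform "accumulate val at key" step used to model both result dicts
def pvAccStep {β : Type} (key : β → String) (val : β → Int) (d : PySem.Dict String Int) (x : β) : PySem.Dict String Int :=
  d.insert (key x) (d.getD (key x) 0 + val x)

lemma pvAcc_getD {β : Type} (key : β → String) (val : β → Int) (l : List β) (d : PySem.Dict String Int) (k : String) :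
    (l.foldl (pvAccStep key val) d).getD k 0
      = d.getD k 0 + ((l.filter (fun x => key x == k)).map val).sum := by
  induction l generalizing d with
  | nil => simp
  | cons x l ih =>
    simp only [List.foldl_cons, ih, List.filter_cons]
    by_cases h : key x = k
    · subst h; simp [pvAccStep]; ring
    · have h' : (key x == k) = false := by simp [h]
      have h2 : k ≠ key x := fun he => h he.symm
      simp [pvAccStep, PySem.Dict.getD_insert, h2, h']

lemma pvAcc_items {β : Type} (key : β → String) (val : β → Int) (l : List β) :
    (l.foldl (pvAccStep key val) PySem.Dict.empty).items
      = (PySem.List.dedup (l.map key)).map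
          (fun k => (k, ((l.filter (fun x => key x == k)).map val).sum)) := by
  have hk : (l.foldl (pvAccStep key val) PySem.Dict.empty).keys = PySem.Set.ofList (l.map key) := by
    simpa using PySem.Dict.keys_foldl_insert_key l key
      (fun d x => d.getD (key x) 0 + val x) PySem.Dict.empty
  have hn : (l.foldl (pvAccStep key val) PySem.Dict.empty).keys.Nodup := by
    exact PySem.Dict.nodup_keys_foldl_insert_key l key _ PySem.Dict.empty (by simp)
  rw [PySem.Dict.items_eq_map_keys _ hn 0, hk]
  refine List.map_congr_left (fun k _ => ?_)
  rw [pvAcc_getD]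
  simp

-- B's grouping loops: items of a setdefault/append fold = ordered key dedup with per-key value lists
lemma pvGroup_items {ν : Type} {β : Type} (key : β → String) (val : β → ν) (l : List β) :
    (l.foldl (fun g x => g.modify (key x) [] (· ++ [val x])) PySem.Dict.empty).items
      = (PySem.List.dedup (l.map key)).map
          (fun k => (k, (l.filter (fun x => key x == k)).map val)) := by
  have hfold : l.foldl (fun g x => g.modify (key x) [] (· ++ [val x])) (PySem.Dict.empty : PySem.Dict String (List ν))
      = (l.map (fun x => (key x, val x))).foldl (fun d p => d.modify p.1 [] (· ++ [p.2])) PySem.Dict.empty := by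
    rw [List.foldl_map]
  have hk : (l.foldl (fun g x => g.modify (key x) [] (· ++ [val x])) (PySem.Dict.empty : PySem.Dict String (List ν))).keys
      = PySem.Set.ofList (l.map key) := by
    simpa using PySem.Dict.keys_foldl_modify_key l key ([] : List ν)
      (fun _ x vs => vs ++ [val x]) PySem.Dict.empty
  have hn : (l.foldl (fun g x => g.modify (key x) [] (· ++ [val x])) (PySem.Dict.empty : PySem.Dict String (List ν))).keys.Nodup := by
    exact PySem.Dict.nodup_keys_foldl_modify_key l key _ _ PySem.Dict.empty (by simp)
  rw [PySem.Dict.items_eq_map_keys _ hn [], hk]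
  refine List.map_congr_left (fun k _ => ?_)
  rw [hfold, PySem.Dict.getD_foldl_modify_append]
  simp [List.filter_map, Function.comp_def]

-- A's children-loop step, on merged triples (parent, normed, value)
def pvChildStep (c : PySem.Dict String (PySem.Dict String Int)) (x : String × String × Int) : PySem.Dict String (PySem.Dict String Int) :=
  c.insert x.1 ((c.getD x.1 PySem.Dict.empty).insert x.2.1
    ((c.getD x.1 PySem.Dict.empty).getD x.2.1 0 + x.2.2))

lemma pvChild_getD (l : List (String × String × Int)) (c : PySem.Dict String (PySem.Dict String Int)) (q : String) :
    (l.foldl pvChildStep c).getD q PySem.Dict.empty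
      = (l.filter (fun x => x.1 == q)).foldl (pvAccStep (fun x => x.2.1) (fun x => x.2.2)) (c.getD q PySem.Dict.empty) := by
  induction l generalizing c with
  | nil => simp
  | cons x l ih =>
    simp only [List.foldl_cons, ih, List.filter_cons]
    by_cases h : x.1 = q
    · subst h; simp [pvChildStep, pvAccStep]
    · have h' : (x.1 == q) = false := by simp [h]
      have h2 : q ≠ x.1 := fun he => h he.symm
      simp [pvChildStep, PySem.Dict.getD_insert, h2, h']

lemma pvChild_items (l : List (String × String × Int)) :
    (l.foldl pvChildStep PySem.Dict.empty).items
      = (PySem.List.dedup (l.map (·.1))).map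
          (fun q => (q, (l.filter (fun x => x.1 == q)).foldl (pvAccStep (fun x => x.2.1) (fun x => x.2.2)) PySem.Dict.empty)) := by
  have hk : (l.foldl pvChildStep PySem.Dict.empty).keys = PySem.Set.ofList (l.map (·.1)) := by
    simpa using PySem.Dict.keys_foldl_insert_key l (·.1)
      (fun c x => (c.getD x.1 PySem.Dict.empty).insert x.2.1
        ((c.getD x.1 PySem.Dict.empty).getD x.2.1 0 + x.2.2)) PySem.Dict.empty
  have hn : (l.foldl pvChildStep PySem.Dict.empty).keys.Nodup := by
    exact PySem.Dict.nodup_keys_foldl_insert_key l (·.1) _ PySem.Dict.empty (by simp)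
  rw [PySem.Dict.items_eq_map_keys _ hn PySem.Dict.empty, hk]
  refine List.map_congr_left (fun q _ => ?_)
  rw [pvChild_getD]
  simp

-- A's combined pair-state loop projects to the two uniform folds over B's tagged / merged lists
lemma pvFold_fst (eff : PySem.Dict String String) (bd : List (String × Int))
    (r : PySem.Dict String Int) (c : PySem.Dict String (PySem.Dict String Int)) :
    (bd.foldl (fun rc bv =>
      let normed := normalize_bucket bv.1
      match eff.get? normed with
      | some parent =>
        if parent = "" then
          (rc.1.insert normed (rc.1.getD normed 0 + bv.2), rc.2)
        else
          (rc.1.insert parent (rc.1.getD parent 0 + bv.2),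
           rc.2.insert parent ((rc.2.getD parent PySem.Dict.empty).insert normed
             ((rc.2.getD parent PySem.Dict.empty).getD normed 0 + bv.2)))
      | none => (rc.1.insert normed (rc.1.getD normed 0 + bv.2), rc.2)) (r, c)).1
    = ((bd.map (fun bv => (normalize_bucket bv.1, bv.2))).map (fun nv =>
        ((match eff.get? nv.1 with
          | some p => if p = "" then nv.1 else p
          | none => nv.1), nv.1, nv.2))).foldl (pvAccStep (·.1) (fun x => x.2.2)) r := by
  induction bd generalizing r c with
  | nil => simp
  | cons bv bd ih =>
    simp only [List.map_cons, List.foldl_cons]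
    cases hp : eff.get? (normalize_bucket bv.1) with
    | none => simpa [hp, pvAccStep] using ih _ _
    | some p =>
      by_cases hps : p = ""
      · subst hps; simpa [hp, pvAccStep] using ih _ _
      · simpa [hp, hps, pvAccStep] using ih _ _

lemma pvFold_snd (eff : PySem.Dict String String) (bd : List (String × Int))
    (r : PySem.Dict String Int) (c : PySem.Dict String (PySem.Dict String Int)) :
    (bd.foldl (fun rc bv =>
      let normed := normalize_bucket bv.1
      match eff.get? normed with
      | some parent =>
        if parent = "" then
          (rc.1.insert normed (rc.1.getD normed 0 + bv.2), rc.2)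
        else
          (rc.1.insert parent (rc.1.getD parent 0 + bv.2),
           rc.2.insert parent ((rc.2.getD parent PySem.Dict.empty).insert normed
             ((rc.2.getD parent PySem.Dict.empty).getD normed 0 + bv.2)))
      | none => (rc.1.insert normed (rc.1.getD normed 0 + bv.2), rc.2)) (r, c)).2
    = (((bd.map (fun bv => (normalize_bucket bv.1, bv.2))).map (fun nv =>
        ((match eff.get? nv.1 with
          | some p => if p = "" then nv.1 else p
          | none => nv.1), nv.1, nv.2))).filter (fun x =>
            match eff.get? x.2.1 with
            | some p => !(p == "")
            | none => false)).foldl pvChildStep c := by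
  induction bd generalizing r c with
  | nil => simp
  | cons bv bd ih =>
    simp only [List.map_cons, List.foldl_cons, List.filter_cons]
    cases hp : eff.get? (normalize_bucket bv.1) with
    | none => simpa [hp] using ih _ _
    | some p =>
      by_cases hps : p = ""
      · subst hps; simpa [hp] using ih _ _
      · simpa [hp, hps, pvChildStep] using ih _ _

-- ===== VERDICT (by name: the statement is the Claim_ definition above) =====
theorem rollup_breakdown_spec : Claim_equal_rollup_breakdown := by
  intro breakdown overrides _
  unfold Spec_rollup_breakdown rollup_breakdown rollup_breakdown_alt
  dsimp only
  refine Prod.ext ?_ ?_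
  · rw [pvFold_fst (pvEffective overrides) breakdown, pvAcc_items, pvGroup_items]
    simp [List.map_map]
  · rw [pvFold_snd (pvEffective overrides) breakdown, pvChild_items, pvGroup_items]
    unfold pvSub
    simp only [List.map_map, Function.comp_def, pvAcc_items, pvGroup_items, List.filter_map,
      List.filter_filter]
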